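-- pv_equiv track=rewrite | github.com/spbu-ds-practicum-2025/dream-team-house | services/text-service/app/main.py | resolve_default_roles
-- ===== SOURCE A (Python) =====
-- from typing import List, Optional
--
-- DEFAULT_ROLE_PRESETS = [
--     {
--         "role_key": "researcher",
--         "name": "Исследователь",
--         "prompt": "Добавляй факты, контекст и данные. Раскрывай тему глубже за счет примеров и ссылок на источники.",
--     },
--     {
--         "role_key": "narrator",
--         "name": "Нарративный писатель",
--         "prompt": "Увеличивай объем текста связными абзацами и плавными переходами между идеями, делая рассказ цельным.",
--     },
--     {
--         "role_key": "analyst",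
--         "name": "Аналитик",
--         "prompt": "Расширяй аргументацию: добавляй выводы, сравнения и структурированные рассуждения без воды и повторов.",
--     },
--     {
--         "role_key": "strategist",
--         "name": "Стратег",
--         "prompt": "Предлагай практические шаги и планы. Раскрывай идеи через детальные рекомендации и сценарии применения.",
--     },
--     {
--         "role_key": "quality_guard",
--         "name": "Редактор качества",
--         "prompt": "Укрепляй стиль и чистоту текста, убирай явные повторы, добавляй уточнения и разъяснения для ясности.",
--     },
--     {
--         "role_key": "storyfinder",
--         "name": "Охотник за примерами",
--         "prompt": "Расширяй разделы конкретикой: кейсы, мини-истории, жизненные ситуации, которые иллюстрируют тезисы.",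
--     },
--     {
--         "role_key": "visionary",
--         "name": "Визионер",
--         "prompt": "Добавляй содержательные идеи о будущем, трендах и последствиях, избегая пафоса и бессодержательных повторов.",
--     },
--     {
--         "role_key": "connector",
--         "name": "Связующий",
--         "prompt": "Добавляй мостики между разделами, показывай как части текста поддерживают друг друга, укрепляй логику.",
--     },
--     {
--         "role_key": "localizer",
--         "name": "Локализатор",
--         "prompt": "Адаптируй под аудиторию, добавляй отраслевые и культурные нюансы, расширяй примеры под контекст читателя.",
--     },
--     {
--         "role_key": "mentor",
--         "name": "Ментор",
--         "prompt": "Давай развёрнутые объяснения и советы, добавляй пошаговые инструкции, избегая пустых извинений и просьб.",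
--     },
-- ]
--
-- DEFAULT_ROLE_SETS = {
--     "light": ["researcher", "narrator", "analyst"],
--     "pro": [
--         "researcher",
--         "narrator",
--         "analyst",
--         "strategist",
--         "quality_guard",
--         "storyfinder",
--         "visionary",
--         "connector",
--         "localizer",
--         "mentor",
--     ],
-- }
--
-- def resolve_default_roles(mode: Optional[str], agent_count: int) -> List[dict]:
--     """Select default roles for mode and ensure list has requested length."""
--     preset_map = {role["role_key"]: role for role in DEFAULT_ROLE_PRESETS}
--     keys = DEFAULT_ROLE_SETS.get(mode or "light", DEFAULT_ROLE_SETS["light"])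
--     roles: List[dict] = []
--     while len(roles) < agent_count:
--         key = keys[len(roles) % len(keys)]
--         roles.append(preset_map.get(key, DEFAULT_ROLE_PRESETS[0]))
--     return roles[:agent_count]
-- ===== SOURCE B (Python) =====
-- from typing import List, Optional
--
-- # Role data as flat (key, name, prompt) triples; records are built on demand.
-- _ROLE_DATA = [
--     ('researcher', 'Исследователь', 'Добавляй факты, контекст и данные. Раскрывай тему глубже за счет примеров и ссылок на источники.'),
--     ('narrator', 'Нарративный писатель', 'Увеличивай объем текста связными абзацами и плавными переходами между идеями, делая рассказ цельным.'),
--     ('analyst', 'Аналитик', 'Расширяй аргументацию: добавляй выводы, сравнения и структурированные рассуждения без воды и повторов.'),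
--     ('strategist', 'Стратег', 'Предлагай практические шаги и планы. Раскрывай идеи через детальные рекомендации и сценарии применения.'),
--     ('quality_guard', 'Редактор качества', 'Укрепляй стиль и чистоту текста, убирай явные повторы, добавляй уточнения и разъяснения для ясности.'),
--     ('storyfinder', 'Охотник за примерами', 'Расширяй разделы конкретикой: кейсы, мини-истории, жизненные ситуации, которые иллюстрируют тезисы.'),
--     ('visionary', 'Визионер', 'Добавляй содержательные идеи о будущем, трендах и последствиях, избегая пафоса и бессодержательных повторов.'),
--     ('connector', 'Связующий', 'Добавляй мостики между разделами, показывай как части текста поддерживают друг друга, укрепляй логику.'),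
--     ('localizer', 'Локализатор', 'Адаптируй под аудиторию, добавляй отраслевые и культурные нюансы, расширяй примеры под контекст читателя.'),
--     ('mentor', 'Ментор', 'Давай развёрнутые объяснения и советы, добавляй пошаговые инструкции, избегая пустых извинений и просьб.'),
-- ]
--
-- _LIGHT_KEYS = ["researcher", "narrator", "analyst"]
-- _PRO_KEYS = [t[0] for t in _ROLE_DATA]
--
--
-- def _lookup(key):
--     """Linear search for the triple with the given role key; first triple as fallback."""
--     for t in _ROLE_DATA:
--         if t[0] == key:
--             return t
--     return _ROLE_DATA[0]
--
--
-- def _record(t):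
--     return {"role_key": t[0], "name": t[1], "prompt": t[2]}
--
--
-- def resolve_default_roles(mode: Optional[str], agent_count: int) -> List[dict]:
--     """Select default roles for mode and ensure list has requested length."""
--     keys = _PRO_KEYS if mode == "pro" else _LIGHT_KEYS
--     cycle = [_record(_lookup(k)) for k in keys]
--     n = max(agent_count, 0)
--     q, r = divmod(n, len(keys))
--     return cycle * q + cycle[:r]
-- ===== Notes on version B (the rewrite author's own statement) =====
-- stated objective: alternative
-- what changed: B drops A's while loop with modulo indexing and the prebuilt role_key dict: it keeps the role data as flat (key,name,prompt) triples, resolves the per-mode key list by a direct mode=='pro' test, builds the one-cycle record list via linear search per key, and assembles the result arithmetically as cycle*q + cycle[:r] with q,r = divmod(max(agent_count,0), len(keys)).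
import Mathlib
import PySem

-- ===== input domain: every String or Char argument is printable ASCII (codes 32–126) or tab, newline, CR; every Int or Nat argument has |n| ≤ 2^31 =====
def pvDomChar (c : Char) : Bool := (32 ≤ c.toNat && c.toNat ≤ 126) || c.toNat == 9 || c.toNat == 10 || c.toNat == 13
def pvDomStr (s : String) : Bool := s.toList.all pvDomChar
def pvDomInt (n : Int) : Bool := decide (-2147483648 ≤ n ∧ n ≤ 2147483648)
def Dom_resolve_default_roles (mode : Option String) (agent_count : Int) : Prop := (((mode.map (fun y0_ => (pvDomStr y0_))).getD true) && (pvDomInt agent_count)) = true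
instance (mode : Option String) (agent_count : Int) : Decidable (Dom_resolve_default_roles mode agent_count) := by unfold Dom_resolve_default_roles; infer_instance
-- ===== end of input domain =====

-- B replaces A's while loop over a prebuilt role_key dict by flat role triples, a linear key search,
-- and an arithmetic cycle*q + cycle[:r] assembly (alternative decomposition, same cost).

-- ===== PORT A =====
def pvRolePresets : List (List (String × String)) := [
  [("role_key", "researcher"), ("name", "Исследователь"), ("prompt", "Добавляй факты, контекст и данные. Раскрывай тему глубже за счет примеров и ссылок на источники.")],
  [("role_key", "narrator"), ("name", "Нарративный писатель"), ("prompt", "Увеличивай объем текста связными абзацами и плавными переходами между идеями, делая рассказ цельным.")],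
  [("role_key", "analyst"), ("name", "Аналитик"), ("prompt", "Расширяй аргументацию: добавляй выводы, сравнения и структурированные рассуждения без воды и повторов.")],
  [("role_key", "strategist"), ("name", "Стратег"), ("prompt", "Предлагай практические шаги и планы. Раскрывай идеи через детальные рекомендации и сценарии применения.")],
  [("role_key", "quality_guard"), ("name", "Редактор качества"), ("prompt", "Укрепляй стиль и чистоту текста, убирай явные повторы, добавляй уточнения и разъяснения для ясности.")],
  [("role_key", "storyfinder"), ("name", "Охотник за примерами"), ("prompt", "Расширяй разделы конкретикой: кейсы, мини-истории, жизненные ситуации, которые иллюстрируют тезисы.")],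
  [("role_key", "visionary"), ("name", "Визионер"), ("prompt", "Добавляй содержательные идеи о будущем, трендах и последствиях, избегая пафоса и бессодержательных повторов.")],
  [("role_key", "connector"), ("name", "Связующий"), ("prompt", "Добавляй мостики между разделами, показывай как части текста поддерживают друг друга, укрепляй логику.")],
  [("role_key", "localizer"), ("name", "Локализатор"), ("prompt", "Адаптируй под аудиторию, добавляй отраслевые и культурные нюансы, расширяй примеры под контекст читателя.")],
  [("role_key", "mentor"), ("name", "Ментор"), ("prompt", "Давай развёрнутые объяснения и советы, добавляй пошаговые инструкции, избегая пустых извинений и просьб.")]]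

def pvRoleSets : PySem.Dict String (List String) := PySem.Dict.ofList [("light", ["researcher", "narrator", "analyst"]), ("pro", ["researcher", "narrator", "analyst", "strategist", "quality_guard", "storyfinder", "visionary", "connector", "localizer", "mentor"])]

-- role["role_key"]: Python dict indexing; every preset literally contains the key, so getD with "" is exact here
def pvPresetMap : PySem.Dict String (List (String × String)) :=
  pvRolePresets.foldl
    (fun d role => d.insert (PySem.Dict.getD (PySem.Dict.ofList role) "role_key" "") role)
    PySem.Dict.empty

-- keys = DEFAULT_ROLE_SETS.get(mode or "light", DEFAULT_ROLE_SETS["light"])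
def pvKeys (mode : Option String) : List String :=
  PySem.Dict.getD pvRoleSets
    (match mode with
     | none => "light"
     | some s => if s = "" then "light" else s)   -- 'mode or "light"': None and "" are falsy
    (PySem.Dict.getD pvRoleSets "light" [])

-- A's while loop: append preset_map.get(keys[len(roles) % len(keys)], DEFAULT_ROLE_PRESETS[0]);
-- keys is always nonempty and the modulo index in range, so List.getD with "" is exact
def pvLoopA (keys : List String) (acc : List (List (String × String))) (count : Int) :
    List (List (String × String)) :=
  if _h : (acc.length : Int) < count then
    pvLoopA keys
      (acc ++ [PySem.Dict.getD pvPresetMap (keys.getD (acc.length % keys.length) "") (pvRolePresets.getD 0 [])])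
      count
  else acc
termination_by (count - acc.length).toNat
decreasing_by simp only [List.length_append, List.length_cons, List.length_nil]; omega

def resolve_default_roles (mode : Option String) (agent_count : Int) : List (List (String × String)) :=
  let keys := pvKeys mode
  PySem.List.slice (pvLoopA keys [] agent_count) none (some agent_count)

-- ===== PORT B =====
def pvRoleData : List (String × String × String) := [
  ("researcher", "Исследователь", "Добавляй факты, контекст и данные. Раскрывай тему глубже за счет примеров и ссылок на источники."),
  ("narrator", "Нарративный писатель", "Увеличивай объем текста связными абзацами и плавными переходами между идеями, делая рассказ цельным."),
  ("analyst", "Аналитик", "Расширяй аргументацию: добавляй выводы, сравнения и структурированные рассуждения без воды и повторов."),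
  ("strategist", "Стратег", "Предлагай практические шаги и планы. Раскрывай идеи через детальные рекомендации и сценарии применения."),
  ("quality_guard", "Редактор качества", "Укрепляй стиль и чистоту текста, убирай явные повторы, добавляй уточнения и разъяснения для ясности."),
  ("storyfinder", "Охотник за примерами", "Расширяй разделы конкретикой: кейсы, мини-истории, жизненные ситуации, которые иллюстрируют тезисы."),
  ("visionary", "Визионер", "Добавляй содержательные идеи о будущем, трендах и последствиях, избегая пафоса и бессодержательных повторов."),
  ("connector", "Связующий", "Добавляй мостики между разделами, показывай как части текста поддерживают друг друга, укрепляй логику."),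
  ("localizer", "Локализатор", "Адаптируй под аудиторию, добавляй отраслевые и культурные нюансы, расширяй примеры под контекст читателя."),
  ("mentor", "Ментор", "Давай развёрнутые объяснения и советы, добавляй пошаговые инструкции, избегая пустых извинений и просьб.")]


def pvLightKeys : List String := ["researcher", "narrator", "analyst"]
def pvProKeys : List String := pvRoleData.map (fun t => t.1)

-- _lookup: first triple whose key matches, first triple as fallback
def pvLookup (key : String) : String × String × String :=
  match pvRoleData.find? (fun t => t.1 == key) with
  | some t => t
  | none => pvRoleData.getD 0 ("", "", "")

def pvRecord (t : String × String × String) : List (String × String) :=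
  [("role_key", t.1), ("name", t.2.1), ("prompt", t.2.2)]

def resolve_default_roles_alt (mode : Option String) (agent_count : Int) : List (List (String × String)) :=
  let keys := if mode = some "pro" then pvProKeys else pvLightKeys
  let cycle := keys.map (fun k => pvRecord (pvLookup k))
  let n := max agent_count 0
  let q := PySem.Int.floordiv n (keys.length : Int)
  let r := PySem.Int.mod n (keys.length : Int)
  PySem.List.pyRepeat cycle q ++ PySem.List.slice cycle none (some r)

-- ===== PRECONDITION & SPEC =====
def Spec_resolve_default_roles (mode : Option String) (agent_count : Int) (out : List (List (String × String))) : Prop := out = resolve_default_roles_alt mode agent_count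
instance (mode : Option String) (agent_count : Int) (out : List (List (String × String))) : Decidable (Spec_resolve_default_roles mode agent_count out) := by unfold Spec_resolve_default_roles; infer_instance

-- ===== CLAIM (what is proved, stated in full; the proofs are below) =====
def Claim_equal_resolve_default_roles : Prop := ∀ (mode : Option String) (agent_count : Int), Dom_resolve_default_roles mode agent_count → Spec_resolve_default_roles mode agent_count (resolve_default_roles mode agent_count)

-- ===== LEMMAS AND PROOFS =====

-- A's mode/keys resolution agrees with B's direct test: every non-"pro" mode falls back to the light set
set_option maxRecDepth 4000 in
theorem pvRoleSets_getD (k : String) :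
    PySem.Dict.getD pvRoleSets k (PySem.Dict.getD pvRoleSets "light" [])
      = if k = "pro" then pvProKeys else pvLightKeys := by
  by_cases hp : k = "pro"
  · subst hp; decide
  · by_cases hl : k = "light"
    · subst hl; decide
    · have hmk : pvRoleSets = PySem.Dict.mk [("light", ["researcher", "narrator", "analyst"]),
        ("pro", ["researcher", "narrator", "analyst", "strategist", "quality_guard", "storyfinder",
          "visionary", "connector", "localizer", "mentor"])] := by decide
      rw [PySem.Dict.getD_eq_get?_getD, hmk, PySem.Dict.get?_mk_cons, PySem.Dict.get?_mk_cons]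
      have h1 : ("light" == k) = false := beq_eq_false_iff_ne.mpr (fun h => hl h.symm)
      have h2 : ("pro" == k) = false := beq_eq_false_iff_ne.mpr (fun h => hp h.symm)
      rw [h1, h2]
      simp [PySem.Dict.get?, hp]
      decide

set_option maxRecDepth 4000 in
theorem pvKeys_eq (mode : Option String) :
    pvKeys mode = if mode = some "pro" then pvProKeys else pvLightKeys := by
  cases mode with
  | none => unfold pvKeys; simp [pvRoleSets_getD]
  | some s =>
    unfold pvKeys
    by_cases hs : s = ""
    · subst hs; simp [pvRoleSets_getD]
    · simp only [hs, if_false]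
      rw [pvRoleSets_getD s]
      by_cases hp : s = "pro" <;> simp [hp]

theorem pvKeys_ne_nil (mode : Option String) : pvKeys mode ≠ [] := by
  rw [pvKeys_eq]; split_ifs <;> decide

set_option maxRecDepth 8000 in
-- on both concrete key lists, B's linear-search record equals A's dict lookup
theorem pvCycle_eq (keys : List String) (h : keys = pvProKeys ∨ keys = pvLightKeys) :
    keys.map (fun k => pvRecord (pvLookup k))
      = keys.map (fun k => PySem.Dict.getD pvPresetMap k (pvRolePresets.getD 0 [])) := by
  rcases h with h | h <;> subst h <;> decide

-- characterisation of A's while loop: it appends the cyclic elements one by one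
theorem pvLoopA_spec (keys : List String) (acc : List (List (String × String))) (count : Int) :
    pvLoopA keys acc count
      = acc ++ (List.range ((count - acc.length).toNat)).map
          (fun i => PySem.Dict.getD pvPresetMap (keys.getD ((acc.length + i) % keys.length) "")
            (pvRolePresets.getD 0 [])) := by
  fun_induction pvLoopA keys acc count with
  | case1 acc _h ih =>
    have hlen : ((count : Int) - acc.length).toNat
        = ((count : Int) - (acc ++ [PySem.Dict.getD pvPresetMap
            (keys.getD (acc.length % keys.length) "") (pvRolePresets.getD 0 [])]).length).toNat + 1 := by
      simp only [List.length_append, List.length_cons, List.length_nil]; omega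
    rw [ih, hlen, List.range_succ_eq_map]
    simp only [List.map_cons, List.map_map, List.append_assoc, List.length_append,
      List.length_cons, List.length_nil, List.cons_append, List.nil_append, Nat.add_zero]
    congr 1
    congr 1
    apply List.map_congr_left
    intro i _
    simp only [Function.comp_apply, Nat.zero_add]
    congr 2
    congr 1
    omega
  | case2 acc _h =>
    have : ((count : Int) - acc.length).toNat = 0 := by simp; omega
    simp [this]

-- a prefix of a list is the range-map of its elements
theorem pv_take_eq_map_range {α : Type} (ps : List α) (d : α) {n : Nat} (hn : n ≤ ps.length) :
    ps.take n = (List.range n).map (fun i => ps.getD (i % ps.length) d) := by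
  apply List.ext_getElem
  · simp [Nat.min_eq_left hn]
  · intro i h1 h2
    simp only [List.getElem_take, List.getElem_map, List.getElem_range]
    have hi : i < n := by simpa using h2
    have hip : i < ps.length := lt_of_lt_of_le hi hn
    rw [Nat.mod_eq_of_lt hip, List.getD_eq_getElem ps d hip]

-- the prefix of a replicated cycle is the modulo range-map
theorem pv_take_flatten_replicate {α : Type} (ps : List α) (d : α) :
    ∀ (m n : Nat), n ≤ m * ps.length →
      (List.replicate m ps).flatten.take n
        = (List.range n).map (fun i => ps.getD (i % ps.length) d) := by
  intro m
  induction m with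
  | zero =>
    intro n hn
    have : n = 0 := by simpa using hn
    simp [this]
  | succ m ih =>
    intro n hn
    rw [List.replicate_succ, List.flatten_cons, List.take_append]
    by_cases h : n ≤ ps.length
    · have : n - ps.length = 0 := by omega
      rw [this, List.take_zero, List.append_nil, pv_take_eq_map_range ps d h]
    · rw [not_le] at h
      rw [Nat.succ_mul] at hn
      have hb : n - ps.length ≤ m * ps.length := by omega
      rw [List.take_of_length_le (le_of_lt h), ih (n - ps.length) hb]
      have hsplit : n = ps.length + (n - ps.length) := by omega
      rw [hsplit, List.range_add, List.map_append, List.map_map]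
      congr 1
      · rw [← pv_take_eq_map_range ps d le_rfl, List.take_length]
      · simp only [Nat.add_sub_cancel_left]
        apply List.map_congr_left
        intro i _
        simp [Nat.add_mod_left]

theorem pv_getD_map {α β : Type} (l : List α) (gg : α → β) (j : Nat) (d : β) (d' : α)
    (h : j < l.length) : (l.map gg).getD j d = gg (l.getD j d') := by
  rw [List.getD_eq_getElem (l.map gg) d (by simpa using h), List.getElem_map,
    List.getD_eq_getElem l d' h]

theorem pv_slice_self {α : Type} (xs : List α) (count : Int) (h : xs.length = count.toNat) :
    PySem.List.slice xs none (some count) = xs := by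
  by_cases h0 : 0 ≤ count
  · rw [PySem.List.slice_to xs h0]
    exact List.take_of_length_le (by omega)
  · have hx : xs = [] := List.eq_nil_of_length_eq_zero (by omega)
    subst hx
    simp [PySem.List.slice]

theorem pv_length_flatten_replicate {α : Type} (c : List α) (q : Nat) :
    (List.replicate q c).flatten.length = q * c.length := by
  induction q with
  | zero => simp
  | succ q ih => rw [List.replicate_succ, List.flatten_cons]; simp [ih]; ring

-- B's cycle*q + cycle[:r] equals the first q*L+r elements of the endless cycle
theorem pv_cycle_build {α : Type} (c : List α) (d : α) (Q R : Nat) (hR : R < c.length) :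
    (List.replicate Q c).flatten ++ c.take R
      = (List.range (Q * c.length + R)).map (fun i => c.getD (i % c.length) d) := by
  have hflat : (List.replicate (Q + 1) c).flatten = (List.replicate Q c).flatten ++ c := by
    rw [List.replicate_succ', List.flatten_append]; simp
  have hb : Q * c.length + R ≤ (Q + 1) * c.length := by
    rw [Nat.add_mul, Nat.one_mul]; omega
  rw [← pv_take_flatten_replicate c d (Q + 1) _ hb, hflat]
  rw [show Q * c.length + R = (List.replicate Q c).flatten.length + R from by
    rw [pv_length_flatten_replicate]]
  rw [List.take_append]
  simp

-- ===== VERDICT (by name: the statement is the Claim_ definition above) =====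
theorem resolve_default_roles_spec : Claim_equal_resolve_default_roles := by
  intro mode count _
  unfold Spec_resolve_default_roles resolve_default_roles resolve_default_roles_alt
  dsimp only
  set d := pvRolePresets.getD 0 [] with hd
  set keysB := if mode = some "pro" then pvProKeys else pvLightKeys with hkB
  have hkeys : pvKeys mode = keysB := pvKeys_eq mode
  have hK : keysB ≠ [] := by rw [← hkeys]; exact pvKeys_ne_nil mode
  have hL : 0 < keysB.length := List.length_pos_of_ne_nil hK
  set a := count.toNat with ha
  -- A's side: the loop produces exactly the n cyclic elements, and the final slice keeps them all
  rw [pvLoopA_spec, hkeys]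
  simp only [List.length_nil, Nat.cast_zero, Int.sub_zero, List.nil_append, Nat.zero_add]
  rw [pv_slice_self _ _ (by simp)]
  -- B's side: rewrite the cycle into A's lookup function, then build it arithmetically
  rw [pvCycle_eq keysB (by by_cases h : mode = some "pro" <;> simp [hkB, h])]
  set c := keysB.map (fun k => PySem.Dict.getD pvPresetMap k d) with hc
  have hcl : c.length = keysB.length := by simp [hc]
  have hmax : max count 0 = ((a : Nat) : Int) := by omega
  rw [hmax, PySem.Int.floordiv_natCast, PySem.Int.mod_natCast]
  unfold PySem.List.pyRepeat
  rw [Int.toNat_natCast, PySem.List.slice_to_natCast]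
  rw [pv_cycle_build c d (a / keysB.length) (a % keysB.length) (by rw [hcl]; exact Nat.mod_lt _ hL)]
  rw [hcl, Nat.mul_comm, Nat.div_add_mod a keysB.length]
  apply List.map_congr_left
  intro i hi
  rw [hc, pv_getD_map keysB (fun k => PySem.Dict.getD pvPresetMap k d) (i % keysB.length) d ""
    (Nat.mod_lt _ hL)]
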